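-- pv_equiv track=rewrite | github.com/BroncoYork/Moveable-Math | python/data_functions.py | interpret_data
-- ===== SOURCE A (Python) =====
-- def interpret_data(data, column_info):
--     a = 0
--     b = 0
--     c = 0
--     # For each column, sum the raw values based on which variables each column
--     # corresponds to
--     for i in range(len(column_info)):
--         if column_info[i] == 'a':
--             a = a + data[i]
--         if column_info[i] == 'b':
--             b = b + data[i]
--         if column_info[i] == 'c':
--             c = c + data[i]
--     return a, b, c
-- ===== SOURCE B (Python) =====
-- def interpret_data(data, column_info):
--     n = len(column_info)
--     a = sum(data[i] for i in range(n) if column_info[i] == 'a')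
--     b = sum(data[i] for i in range(n) if column_info[i] == 'b')
--     c = sum(data[i] for i in range(n) if column_info[i] == 'c')
--     return a, b, c
-- ===== Notes on version B (the rewrite author's own statement) =====
-- stated objective: idiomatic
-- what changed: Replaces A's single interleaved loop with three-way accumulator state by three independent filtered generator sums over the same index range, one per label.
import Mathlib
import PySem

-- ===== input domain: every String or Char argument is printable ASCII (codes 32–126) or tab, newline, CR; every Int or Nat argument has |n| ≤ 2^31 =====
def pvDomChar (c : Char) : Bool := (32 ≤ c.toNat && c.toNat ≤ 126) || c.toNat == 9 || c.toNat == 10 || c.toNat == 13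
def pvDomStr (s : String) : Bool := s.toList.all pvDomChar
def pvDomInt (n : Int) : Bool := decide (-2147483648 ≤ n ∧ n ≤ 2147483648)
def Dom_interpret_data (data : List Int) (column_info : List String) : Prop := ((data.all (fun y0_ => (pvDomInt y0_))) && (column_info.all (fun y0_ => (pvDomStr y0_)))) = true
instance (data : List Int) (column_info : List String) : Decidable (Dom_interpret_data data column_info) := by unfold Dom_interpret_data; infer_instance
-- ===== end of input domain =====

-- B replaces A's single interleaved loop with three independent filtered sums (one per label); objective: idiomatic.


-- ===== PORT A =====
-- one pass over range(len(column_info)), updating the three accumulators in step order;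
-- data[i]/column_info[i] are in range under Pre_, so the .getD defaults are never taken there
def interpret_data (data : List Int) (column_info : List String) : Int × Int × Int :=
  (PySem.List.pyRange 0 (column_info.length : Int) 1).foldl
    (fun (s : Int × Int × Int) i =>
      let lbl := (PySem.List.pyGet? column_info i).getD ""
      let s := if lbl == "a" then (s.1 + (PySem.List.pyGet? data i).getD 0, s.2.1, s.2.2) else s
      let s := if lbl == "b" then (s.1, s.2.1 + (PySem.List.pyGet? data i).getD 0, s.2.2) else s
      let s := if lbl == "c" then (s.1, s.2.1, s.2.2 + (PySem.List.pyGet? data i).getD 0) else s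
      s)
    (0, 0, 0)

-- ===== PORT B =====
-- sum(data[i] for i in range(n) if column_info[i] == label)
def pvLabelSum (data : List Int) (column_info : List String) (label : String) : Int :=
  (((PySem.List.pyRange 0 (column_info.length : Int) 1).filter
      (fun i => (PySem.List.pyGet? column_info i).getD "" == label)).map
    (fun i => (PySem.List.pyGet? data i).getD 0)).sum

def interpret_data_alt (data : List Int) (column_info : List String) : Int × Int × Int :=
  (pvLabelSum data column_info "a", pvLabelSum data column_info "b", pvLabelSum data column_info "c")

-- ===== PRECONDITION & SPEC =====
-- A (and B) raise IndexError exactly when some position labelled 'a'/'b'/'c' has no datum; excluded here.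
def Pre_interpret_data (data : List Int) (column_info : List String) : Prop :=
  ∀ i : Nat, i < column_info.length →
    (column_info[i]! = "a" ∨ column_info[i]! = "b" ∨ column_info[i]! = "c") → i < data.length
instance (data : List Int) (column_info : List String) : Decidable (Pre_interpret_data data column_info) := by unfold Pre_interpret_data; infer_instance
def pvWitness_interpret_data : List Int × List String := ([1, 2, 3], ["a", "c", "x"])
def Spec_interpret_data (data : List Int) (column_info : List String) (out : Int × Int × Int) : Prop := out = interpret_data_alt data column_info
instance (data : List Int) (column_info : List String) (out : Int × Int × Int) : Decidable (Spec_interpret_data data column_info out) := by unfold Spec_interpret_data; infer_instance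

-- ===== CLAIM (what is proved, stated in full; the proofs are below) =====
def Claim_equal_interpret_data : Prop := ∀ (data : List Int) (column_info : List String), Dom_interpret_data data column_info → Pre_interpret_data data column_info → Spec_interpret_data data column_info (interpret_data data column_info)

-- ===== LEMMAS AND PROOFS =====

-- filtered sum over a list of indices
def pvS (data : List Int) (column_info : List String) (label : String) (L : List Int) : Int :=
  ((L.filter (fun i => (PySem.List.pyGet? column_info i).getD "" == label)).map
    (fun i => (PySem.List.pyGet? data i).getD 0)).sum

theorem pvS_cons (data : List Int) (column_info : List String) (label : String) (x : Int) (xs : List Int) :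
    pvS data column_info label (x :: xs)
      = (if (PySem.List.pyGet? column_info x).getD "" == label then (PySem.List.pyGet? data x).getD 0 else 0)
        + pvS data column_info label xs := by
  simp only [pvS, List.filter_cons]
  split <;> simp

theorem pv_fold_eq (data : List Int) (column_info : List String) :
    ∀ (L : List Int) (s : Int × Int × Int),
      L.foldl
        (fun (s : Int × Int × Int) i =>
          let lbl := (PySem.List.pyGet? column_info i).getD ""
          let s := if lbl == "a" then (s.1 + (PySem.List.pyGet? data i).getD 0, s.2.1, s.2.2) else s
          let s := if lbl == "b" then (s.1, s.2.1 + (PySem.List.pyGet? data i).getD 0, s.2.2) else s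
          let s := if lbl == "c" then (s.1, s.2.1, s.2.2 + (PySem.List.pyGet? data i).getD 0) else s
          s) s
      = (s.1 + pvS data column_info "a" L,
         s.2.1 + pvS data column_info "b" L,
         s.2.2 + pvS data column_info "c" L) := by
  intro L
  induction L with
  | nil => intro s; simp [pvS]
  | cons x xs ih =>
    intro s
    simp only [List.foldl_cons, ih, pvS_cons]
    split_ifs <;> simp <;> ring_nf <;> simp [Int.add_comm, Int.add_left_comm]

-- ===== VERDICT (by name: the statement is the Claim_ definition above) =====
theorem interpret_data_spec : Claim_equal_interpret_data := by
  intro data column_info _ _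
  show interpret_data data column_info = interpret_data_alt data column_info
  unfold interpret_data interpret_data_alt pvLabelSum
  rw [pv_fold_eq]
  simp [pvS]
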